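-- pv_equiv track=rewrite | github.com/sraone-96/sem-31 | 31/smai/assignments/assignment1/datasets/q4/4.py | find
-- ===== SOURCE A (Python) =====
-- from collections import defaultdict
--
-- def find(final):
-- 	votes=defaultdict(int)
-- 	for i in final:
-- 		votes[i[1]]+=1
-- 	sortedorder=sorted(votes,key=votes.get,reverse=True)
-- 	highest=votes[sortedorder[0]]
-- 	lst=[]
-- 	for i in votes.keys():
-- 		if(votes[i]==highest):
-- 			lst.append(i)
-- 	for i in final:
-- 		if(i[1] in lst):
-- 			return i
-- ===== SOURCE B (Python) =====
-- def find(final):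
--     counts = {}
--     first = {}
--     for b in final:
--         c = b[1]
--         if c in counts:
--             counts[c] += 1
--         else:
--             counts[c] = 1
--             first[c] = b
--     winner = None
--     for c, n in counts.items():
--         if winner is None or n > counts[winner]:
--             winner = c
--     return first[winner]
-- ===== Notes on version B (the rewrite author's own statement) =====
-- stated objective: alternative
-- what changed: B replaces A's sort-by-count, max-set construction and membership rescan of the input with a single counting pass that also records each candidate's first ballot, followed by one argmax over the candidate dict (earliest-seen candidate wins ties), returning the recorded first ballot.
-- outside the precondition, e.g. on find([]): A raises IndexError, B raises KeyError
import Mathlib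
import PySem

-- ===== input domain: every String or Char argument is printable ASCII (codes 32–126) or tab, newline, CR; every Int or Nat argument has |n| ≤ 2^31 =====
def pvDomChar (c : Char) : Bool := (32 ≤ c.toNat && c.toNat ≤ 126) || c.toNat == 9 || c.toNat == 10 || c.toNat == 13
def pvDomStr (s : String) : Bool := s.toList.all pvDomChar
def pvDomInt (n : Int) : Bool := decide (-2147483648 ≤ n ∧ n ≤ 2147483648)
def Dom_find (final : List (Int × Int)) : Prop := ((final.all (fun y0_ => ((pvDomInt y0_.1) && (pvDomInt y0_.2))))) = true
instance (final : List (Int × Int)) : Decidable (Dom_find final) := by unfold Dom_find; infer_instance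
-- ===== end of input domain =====

-- B replaces A's sort, max-set and membership rescan by one counting pass that also records each
-- candidate's first ballot, then a single argmax over the candidate dict (alternative decomposition, not claimed faster).

-- ===== PORT A =====
-- A's final loop 'for i in final: if i[1] in lst: return i' ((0,0) = fall-through, unreachable under Pre_find)
def retLoop (lst : List Int) : List (Int × Int) → Int × Int
  | [] => (0, 0)
  | i :: rest => if lst.contains i.2 then i else retLoop lst rest

-- 'key=votes.get': every sorted element is a key of votes, so votes.getD k 0 is exactly votes.get(k)'s count
def find (final : List (Int × Int)) : Int × Int :=
  let votes : PySem.Dict Int Int :=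
    final.foldl (fun d i => d.modify i.2 0 (· + 1)) PySem.Dict.empty
  match PySem.List.sorted votes.keys (fun k => votes.getD k 0) true with
  | [] => (0, 0)   -- sortedorder[0] raises IndexError here: excluded by Pre_find
  | k0 :: _ =>
    let highest := votes.getD k0 0
    let lst := votes.keys.foldl (fun acc k => if votes.getD k 0 == highest then acc ++ [k] else acc) ([] : List Int)
    retLoop lst final

-- ===== PORT B =====
-- B's single pass: count each candidate's votes and record its first ballot
def tallyLoop (final : List (Int × Int)) : PySem.Dict Int Int × PySem.Dict Int (Int × Int) :=
  final.foldl (fun cf b =>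
      if cf.1.contains b.2 then (cf.1.modify b.2 0 (· + 1), cf.2)
      else (cf.1.insert b.2 1, cf.2.insert b.2 b))
    (PySem.Dict.empty, PySem.Dict.empty)

def find_alt (final : List (Int × Int)) : Int × Int :=
  let cf := tallyLoop final
  let winner := cf.1.items.foldl (fun w p =>
      match w with
      | none => some p.1
      | some wk => if p.2 > cf.1.getD wk 0 then some p.1 else w) (none : Option Int)
  match winner with
  | none => (0, 0)   -- empty input: B's first[None] raises KeyError, excluded by Pre_find
  | some wk => (cf.2.get? wk).getD (0, 0)   -- the winner's key is always present; getD is first[winner]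

-- ===== PRECONDITION & SPEC =====
-- On [] A raises IndexError (and B raises KeyError): the empty list is excluded.
def Pre_find (final : List (Int × Int)) : Prop := final ≠ []
instance (final : List (Int × Int)) : Decidable (Pre_find final) := by unfold Pre_find; infer_instance
def pvWitness_find : (List (Int × Int)) := [(1, 2), (3, 4), (5, 2)]
def Spec_find (final : List (Int × Int)) (out : Int × Int) : Prop := out = find_alt final
instance (final : List (Int × Int)) (out : Int × Int) : Decidable (Spec_find final out) := by unfold Spec_find; infer_instance

-- ===== CLAIM (what is proved, stated in full; the proofs are below) =====
def Claim_equal_find : Prop := ∀ (final : List (Int × Int)), Dom_find final → Pre_find final → Spec_find final (find final)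

-- ===== LEMMAS AND PROOFS =====

-- the value kept by B's argmax loop: first element of w :: l with (strictly) maximal v
def argmax1 (v : Int → Int) : Int → List Int → Int
  | w, [] => w
  | w, k :: l => argmax1 v (if v k > v w then k else w) l

theorem tally_fst (l : List (Int × Int)) (d : PySem.Dict Int Int) (f : PySem.Dict Int (Int × Int)) :
    (l.foldl (fun cf b =>
      if cf.1.contains b.2 then (cf.1.modify b.2 0 (· + 1), cf.2)
      else (cf.1.insert b.2 1, cf.2.insert b.2 b)) (d, f)).1
    = l.foldl (fun d i => d.modify i.2 0 (· + 1)) d := by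
  induction l generalizing d f with
  | nil => rfl
  | cons b rest ih =>
    simp only [List.foldl_cons]
    by_cases hb : d.contains b.2 = true
    · simp only [hb, if_pos]
      exact ih _ _
    · simp only [Bool.not_eq_true] at hb
      simp only [hb, Bool.false_eq_true, if_neg, not_false_iff]
      have hm : d.modify b.2 0 (· + 1) = d.insert b.2 1 := by
        simp [PySem.Dict.modify, PySem.Dict.getD_of_not_contains _ _ hb]
      rw [hm]
      exact ih _ _

theorem counts_eq (final : List (Int × Int)) :
    (tallyLoop final).1 = PySem.Dict.counter (final.map (fun i => i.2)) := by
  rw [tallyLoop, tally_fst, PySem.Dict.counter_eq_foldl, List.foldl_map]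

theorem tally_snd (l : List (Int × Int)) (d : PySem.Dict Int Int) (f : PySem.Dict Int (Int × Int))
    (h : ∀ c, d.contains c = (f.get? c).isSome) (c : Int) :
    ((l.foldl (fun cf b =>
      if cf.1.contains b.2 then (cf.1.modify b.2 0 (· + 1), cf.2)
      else (cf.1.insert b.2 1, cf.2.insert b.2 b)) (d, f)).2).get? c
    = (f.get? c).or (l.find? (fun i => i.2 == c)) := by
  induction l generalizing d f with
  | nil => simp
  | cons b rest ih =>
    simp only [List.foldl_cons]
    by_cases hb : d.contains b.2 = true
    · simp only [hb, if_pos]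
      rw [ih _ _ (fun c' => ?_)]
      · by_cases hbc : b.2 = c
        · have hs : (f.get? c).isSome := by rw [← h c, ← hbc]; exact hb
          obtain ⟨val, hval⟩ := Option.isSome_iff_exists.mp hs
          simp [hval]
        · rw [List.find?_cons_of_neg (by simp [hbc])]
      · rw [PySem.Dict.contains_modify]
        by_cases hc' : c' = b.2
        · subst hc'; simp [← h, hb]
        · simp [hc', h c']
    · simp only [Bool.not_eq_true] at hb
      simp only [hb, Bool.false_eq_true, if_neg, not_false_iff]
      rw [ih _ _ (fun c' => ?_)]
      · rw [PySem.Dict.get?_insert]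
        by_cases hbc : b.2 = c
        · have hf : f.get? c = none := by
            have hh := h c
            rw [← hbc, hb] at hh
            cases hfc : f.get? c
            · rfl
            · rw [← hbc] at hfc; rw [hfc] at hh; simp at hh
          rw [List.find?_cons_of_pos (by simp [hbc])]
          simp [hbc, hf]
        · rw [List.find?_cons_of_neg (by simp [hbc])]
          simp [Ne.symm hbc]
      · rw [PySem.Dict.contains_insert, PySem.Dict.get?_insert]
        by_cases hc' : c' = b.2
        · subst hc'; simp
        · simp [hc', h c']

theorem argmax1_spec (v : Int → Int) (l : List Int)  :
    ∀ w, (∀ y ∈ w :: l, v y ≤ v (argmax1 v w l)) ∧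
      (w :: l).find? (fun y => v y == v (argmax1 v w l)) = some (argmax1 v w l) := by
  induction l with
  | nil =>
    intro w
    refine ⟨?_, ?_⟩
    · intro y hy; simp only [List.mem_cons, List.not_mem_nil, or_false] at hy
      subst hy; exact le_refl _
    · simp [argmax1]
  | cons k t ih =>
    intro w
    simp only [argmax1]
    by_cases hk : v k > v w
    · simp only [if_pos hk]
      obtain ⟨h1, h2⟩ := ih k
      refine ⟨?_, ?_⟩
      · intro y hy
        rcases List.mem_cons.mp hy with hy | hy
        · subst hy; exact le_of_lt (lt_of_lt_of_le hk (h1 k (List.mem_cons_self)))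
        · exact h1 y hy
      · have hw : v w ≠ v (argmax1 v k t) :=
          ne_of_lt (lt_of_lt_of_le hk (h1 k (List.mem_cons_self)))
        rw [List.find?_cons_of_neg (by simp [hw])]
        exact h2
    · simp only [if_neg hk]
      rw [not_lt] at hk
      obtain ⟨h1, h2⟩ := ih w
      refine ⟨?_, ?_⟩
      · intro y hy
        rcases List.mem_cons.mp hy with hy | hy
        · subst hy; exact h1 y (List.mem_cons_self)
        rcases List.mem_cons.mp hy with hy | hy
        · subst hy; exact le_trans hk (h1 w (List.mem_cons_self))
        · exact h1 y (List.mem_cons_of_mem _ hy)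
      · by_cases hw : v w = v (argmax1 v w t)
        · have : (w :: t).find? (fun y => v y == v (argmax1 v w t)) = some w :=
            List.find?_cons_of_pos (by simp [hw])
          rw [this] at h2
          rw [List.find?_cons_of_pos (by simp [hw]), h2]
        · have hwlt : v w < v (argmax1 v w t) :=
            lt_of_le_of_ne (h1 w (List.mem_cons_self)) hw
          have hkne : v k ≠ v (argmax1 v w t) := ne_of_lt (lt_of_le_of_lt hk hwlt)
          rw [List.find?_cons_of_neg (by simp [hw]),
              List.find?_cons_of_neg (by simp [hkne])]
          rw [List.find?_cons_of_neg (by simp [hw])] at h2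
          exact h2

theorem fold_items (cs : List Int) (l : List Int) :
    ∀ w, ((l.map (fun k => (k, ((List.count k cs : Int))))).foldl
      (fun w p => match w with
        | none => some p.1
        | some wk => if p.2 > (PySem.Dict.counter cs).getD wk 0 then some p.1 else w) (some w))
    = some (argmax1 (fun c => ((List.count c cs : Int))) w l) := by
  induction l with
  | nil => intro w; rfl
  | cons k t ih =>
    intro w
    simp only [List.map_cons, List.foldl_cons, argmax1]
    by_cases hk : ((List.count k cs : Int)) > (PySem.Dict.counter cs).getD w 0
    · rw [if_pos hk, if_pos (by rwa [PySem.Dict.getD_counter] at hk)]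
      exact ih k
    · rw [if_neg hk, if_neg (by rwa [PySem.Dict.getD_counter] at hk)]
      exact ih w

theorem fold_items_none (cs : List Int) (k₁ : Int) (Kt : List Int) :
    ((k₁ :: Kt).map (fun k => (k, ((List.count k cs : Int))))).foldl
      (fun w p => match w with
        | none => some p.1
        | some wk => if p.2 > (PySem.Dict.counter cs).getD wk 0 then some p.1 else w) none
    = some (argmax1 (fun c => ((List.count c cs : Int))) k₁ Kt) := by
  simp only [List.map_cons, List.foldl_cons]
  exact fold_items cs Kt k₁

theorem pvfd_discard (p : Int → Bool) (x : Int) (hx : p x = false) (s : List Int) :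
    (PySem.Set.discard s x).find? p = s.find? p := by
  induction s with
  | nil => rfl
  | cons y t ih =>
    simp only [PySem.Set.discard, List.filter_cons] at ih ⊢
    by_cases hyx : (y == x) = true
    · have hpy : p y = false := by rw [eq_of_beq hyx]; exact hx
      rw [List.find?_cons_of_neg (by simp [hpy])]
      simp only [hyx, Bool.not_true, Bool.false_eq_true, if_neg, not_false_iff]
      exact ih
    · simp only [Bool.not_eq_true] at hyx
      simp only [hyx, Bool.not_false, if_pos]
      cases hp : p y
      · rw [List.find?_cons_of_neg (by simp [hp]),
            List.find?_cons_of_neg (by simp [hp])]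
        exact ih
      · rw [List.find?_cons_of_pos hp, List.find?_cons_of_pos hp]

theorem pvfd_ofList (p : Int → Bool) (xs : List Int) :
    (PySem.Set.ofList xs).find? p = xs.find? p := by
  induction xs with
  | nil => rfl
  | cons x t ih =>
    rw [PySem.Set.ofList_cons]
    cases hp : p x
    · rw [List.find?_cons_of_neg (by simp [hp]),
          List.find?_cons_of_neg (by simp [hp]),
          pvfd_discard p x hp, ih]
    · rw [List.find?_cons_of_pos hp, List.find?_cons_of_pos hp]

theorem pvfd_snd_eq (l : List (Int × Int)) (p : Int → Bool) (w : Int) (hw : p w = true) :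
    (l.map (fun i => i.2)).find? p = some w →
    l.find? (fun i => p i.2) = l.find? (fun i => i.2 == w) := by
  induction l with
  | nil => simp
  | cons i rest ih =>
    intro h
    simp only [List.map_cons] at h
    cases hp : p i.2
    · have hiw : (i.2 == w) = false := by
        refine beq_eq_false_iff_ne.mpr (fun he => ?_)
        rw [he, hw] at hp; exact Bool.false_ne_true hp.symm
      rw [List.find?_cons_of_neg (by simp [hp]),
          List.find?_cons_of_neg (by simp [hiw])]
      rw [List.find?_cons_of_neg (by simp [hp])] at h
      exact ih h
    · rw [List.find?_cons_of_pos hp] at h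
      have : i.2 = w := by injection h
      rw [List.find?_cons_of_pos (by simp [hp]),
          List.find?_cons_of_pos (by simp [this])]

theorem retLoop_eq (lst : List Int) (l : List (Int × Int)) :
    retLoop lst l = (l.find? (fun i => lst.contains i.2)).getD (0, 0) := by
  induction l with
  | nil => rfl
  | cons i rest ih =>
    simp only [retLoop]
    by_cases hc : lst.contains i.2 = true
    · rw [List.find?_cons_of_pos (by exact hc), if_pos hc]
      rfl
    · simp only [Bool.not_eq_true] at hc
      rw [List.find?_cons_of_neg (by rw [hc]; simp), if_neg (by rw [hc]; simp)]
      exact ih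

theorem pvfd_congr {α : Type} (l : List α) (p q : α → Bool) (h : ∀ x ∈ l, p x = q x) :
    l.find? p = l.find? q := by
  induction l with
  | nil => rfl
  | cons x t ih =>
    have hx := h x (List.mem_cons_self)
    cases hq : q x
    · rw [List.find?_cons_of_neg (by simp [hx, hq]),
          List.find?_cons_of_neg (by simp [hq])]
      exact ih (fun y hy => h y (List.mem_cons_of_mem _ hy))
    · rw [List.find?_cons_of_pos (by rw [hx]; exact hq), List.find?_cons_of_pos hq]

-- ===== VERDICT (by name: the statement is the Claim_ definition above) =====
theorem find_spec : Claim_equal_find := by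
  unfold Claim_equal_find
  intro final _ hpre
  unfold Pre_find at hpre
  unfold Spec_find
  set cs : List Int := final.map (fun i => i.2) with hcs
  have hA : final.foldl (fun d i => d.modify i.2 0 (· + 1)) PySem.Dict.empty
      = PySem.Dict.counter cs := by
    rw [hcs, PySem.Dict.counter_eq_foldl, List.foldl_map]
  obtain ⟨k₁, Kt, hK⟩ : ∃ a t, PySem.Set.ofList cs = a :: t := by
    cases final with
    | nil => exact absurd rfl hpre
    | cons a t =>
      rw [hcs, List.map_cons, PySem.Set.ofList_cons]
      exact ⟨_, _, rfl⟩
  have hkeyfun : (fun k => (PySem.Dict.counter cs).getD k 0)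
      = (fun c => ((List.count c cs : Int))) := by
    funext k; exact PySem.Dict.getD_counter cs k
  obtain ⟨k0, t0, hs⟩ : ∃ k0 t0,
      PySem.List.sorted (PySem.Set.ofList cs) (fun c => ((List.count c cs : Int))) true = k0 :: t0 := by
    cases hsort : PySem.List.sorted (PySem.Set.ofList cs) (fun c => ((List.count c cs : Int))) true with
    | nil =>
      have := (PySem.List.sorted_eq_nil_iff _ _ _).mp hsort
      rw [hK] at this; exact absurd this (by simp)
    | cons a t => exact ⟨a, t, rfl⟩
  have hmax : ∀ y ∈ PySem.Set.ofList cs, ((List.count y cs : Int)) ≤ ((List.count k0 cs : Int)) :=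
    PySem.List.key_head_sorted_rev_ge _ _ hs
  have hk0mem : k0 ∈ PySem.Set.ofList cs := by
    have h := (PySem.List.mem_sorted (x := k0) (xs := PySem.Set.ofList cs)
      (key := fun c => ((List.count c cs : Int))) (rev := true)).mp
    apply h; rw [hs]; exact List.mem_cons_self
  -- the winner B selects
  obtain ⟨hargmax, hargfind⟩ := argmax1_spec (fun c => ((List.count c cs : Int))) Kt k₁
  set w : Int := argmax1 (fun c => ((List.count c cs : Int))) k₁ Kt with hw
  have hwmem : w ∈ PySem.Set.ofList cs := by
    rw [hK]; exact List.mem_of_find?_eq_some hargfind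
  have hvw : ((List.count w cs : Int)) = ((List.count k0 cs : Int)) := by
    refine le_antisymm (hmax w hwmem) ?_
    have := hargmax k0 (by rw [← hK]; exact hk0mem)
    exact this
  -- A's value: first ballot whose candidate has the highest count
  have hAval : find final
      = (final.find? (fun i => ((List.count i.2 cs : Int)) == ((List.count k0 cs : Int)))).getD (0, 0) := by
    simp only [find, hA, PySem.Dict.keys_counter, hkeyfun, hs]
    simp only [PySem.Dict.getD_counter]
    rw [PySem.List.foldl_append_if
      (fun k => ((List.count k cs : Int)) == ((List.count k0 cs : Int))) (fun k => k)]
    rw [retLoop_eq]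
    congr 1
    refine pvfd_congr _ _ _ (fun i hi => ?_)
    have hiK : i.2 ∈ PySem.Set.ofList cs := by
      rw [PySem.Set.mem_ofList, hcs]
      exact List.mem_map_of_mem hi
    cases hb : (((List.count i.2 cs : Int)) == ((List.count k0 cs : Int)))
    · simp [hb, List.mem_filter]
    · simp [hb, List.mem_filter, hiK]
  -- B's value: the recorded first ballot of the argmax candidate
  have hsnd : ((tallyLoop final).2).get? w = final.find? (fun i => i.2 == w) := by
    rw [tallyLoop, tally_snd final _ _ (fun c => by simp), PySem.Dict.get?_empty,
      Option.none_or]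
  have hBval : find_alt final = (final.find? (fun i => i.2 == w)).getD (0, 0) := by
    simp only [find_alt, counts_eq, ← hcs, PySem.Dict.items_counter, hK]
    rw [fold_items_none cs k₁ Kt, ← hw]
    show ((tallyLoop final).2.get? w).getD (0, 0)
      = (final.find? (fun i => i.2 == w)).getD (0, 0)
    rw [hsnd]
  -- the two first-ballot searches coincide
  rw [hAval, hBval]
  congr 1
  refine pvfd_snd_eq final
    (fun c => ((List.count c cs : Int)) == ((List.count k0 cs : Int))) w ?_ ?_
  · show (((List.count w cs : Int)) == ((List.count k0 cs : Int))) = true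
    rw [hvw]; exact beq_self_eq_true _
  · rw [← hcs, ← pvfd_ofList, hK]
    have hpred : (fun y => ((List.count y cs : Int)) == ((List.count k0 cs : Int)))
        = (fun y => ((List.count y cs : Int)) == ((List.count w cs : Int))) := by
      funext y; rw [← hvw]
    rw [hpred]
    exact hargfind
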